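-- pv_equiv track=rewrite | github.com/Ahmed712441/LL1-parser | grammar.py | check_identifier
-- ===== SOURCE A (Python) =====
-- def check_identifier(input):
--     try:
--         int(input[0])
--         return False
--     except:
--         for char in input:
--             if not ( ( char >= '1' and char <= '9') or ( char >= 'a' and char <= 'z') or ( char >= 'A' and char <= 'Z')):
--                 return False
--     return True
-- ===== SOURCE B (Python) =====
-- _VALID = set("123456789abcdefghijklmnopqrstuvwxyzABCDEFGHIJKLMNOPQRSTUVWXYZ")
--
-- def check_identifier(input):
--     return (not input or not input[0].isdigit()) and set(input) <= _VALID
-- ===== Notes on version B (the rewrite author's own statement) =====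
-- stated objective: idiomatic
-- what changed: Replaces A's try/int() probe on the first character and explicit per-character range-comparison loop with a declarative test: first char not a digit (str.isdigit) and set(input) a subset of a precomputed valid-character set.
import Mathlib
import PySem

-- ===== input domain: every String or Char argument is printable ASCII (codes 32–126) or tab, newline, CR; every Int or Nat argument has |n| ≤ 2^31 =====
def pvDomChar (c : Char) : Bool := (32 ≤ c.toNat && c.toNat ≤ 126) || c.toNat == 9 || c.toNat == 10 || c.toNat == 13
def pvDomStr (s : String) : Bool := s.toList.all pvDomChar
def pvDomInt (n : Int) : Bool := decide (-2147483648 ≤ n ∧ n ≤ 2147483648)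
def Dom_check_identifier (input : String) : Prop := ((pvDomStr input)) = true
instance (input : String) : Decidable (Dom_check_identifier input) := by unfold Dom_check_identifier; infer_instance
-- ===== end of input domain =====

-- B replaces A's try/int probe and explicit character loop by one set-inclusion test
-- (set(input) <= _VALID) plus a first-char isdigit check; objective: idiomatic/simpler.

-- ===== PORT A =====
def check_identifier (input : String) : Bool :=
  -- try: int(input[0]); return False  —  except (bare) catches both the IndexError of
  -- input[0] on "" (then the for-loop over the empty string passes → True) and the
  -- ValueError of int(...).
  match PySem.Str.pyGet? input 0 with
  | none => true
  | some c =>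
    match PySem.Int.ofStr? (String.ofList [c]) with
    | some _ => false
    | none =>
      -- for char in input: if not (…): return False // return True
      input.toList.all (fun ch =>
        decide (('1' ≤ ch ∧ ch ≤ '9') ∨ ('a' ≤ ch ∧ ch ≤ 'z') ∨ ('A' ≤ ch ∧ ch ≤ 'Z')))

-- ===== PORT B =====
def pvValidChars : PySem.Set Char :=
  PySem.Set.ofList "123456789abcdefghijklmnopqrstuvwxyzABCDEFGHIJKLMNOPQRSTUVWXYZ".toList

def check_identifier_alt (input : String) : Bool :=
  -- return (not input or not input[0].isdigit()) and set(input) <= _VALID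
  (match input.toList with
   | [] => true
   | c :: _ => !PySem.Str.strIsdigit (String.ofList [c]))
  && PySem.Set.issubset (PySem.Set.ofList input.toList) pvValidChars

-- ===== PRECONDITION & SPEC =====
def Spec_check_identifier (input : String) (out : Bool) : Prop := out = check_identifier_alt input
instance (input : String) (out : Bool) : Decidable (Spec_check_identifier input out) := by unfold Spec_check_identifier; infer_instance

-- ===== CLAIM (what is proved, stated in full; the proofs are below) =====
def Claim_equal_check_identifier : Prop := ∀ (input : String), Dom_check_identifier input → Spec_check_identifier input (check_identifier input)

-- ===== LEMMAS AND PROOFS =====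

def pvCond (c : Char) : Bool :=
  decide (('1' ≤ c ∧ c ≤ '9') ∨ ('a' ≤ c ∧ c ≤ 'z') ∨ ('A' ≤ c ∧ c ≤ 'Z'))

-- finite check over all domain code points
set_option maxRecDepth 4000 in
lemma pvKey : ∀ n ∈ List.range 127,
    ((PySem.Int.ofStr? (String.ofList [Char.ofNat n])).isSome
        = PySem.Str.strIsdigit (String.ofList [Char.ofNat n]))
    ∧ ((Char.ofNat n ∈ pvValidChars) ↔ pvCond (Char.ofNat n) = true) := by decide

lemma pvKeyChar (c : Char) (h : pvDomChar c = true) :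
    ((PySem.Int.ofStr? (String.ofList [c])).isSome = PySem.Str.strIsdigit (String.ofList [c]))
    ∧ ((c ∈ pvValidChars) ↔ pvCond c = true) := by
  have hlt : c.toNat < 127 := by
    simp [pvDomChar] at h
    omega
  have := pvKey c.toNat (List.mem_range.mpr hlt)
  rwa [Char.ofNat_toNat] at this

-- ===== VERDICT (by name: the statement is the Claim_ definition above) =====
theorem check_identifier_spec : Claim_equal_check_identifier := by
  intro input hdom
  have hall : ∀ ch ∈ input.toList, pvDomChar ch = true := by
    simpa [Dom_check_identifier, pvDomStr, List.all_eq_true] using hdom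
  unfold Spec_check_identifier check_identifier check_identifier_alt
  have hGet : PySem.Str.pyGet? input 0 = input.toList[0]? := by
    simpa using PySem.Str.pyGet?_natCast input 0
  rw [hGet]
  generalize hxs : input.toList = xs
  rw [hxs] at hall
  cases xs with
  | nil => simp
  | cons c rest =>
    have hc := pvKeyChar c (hall c (by simp))
    simp only [List.getElem?_cons_zero]
    by_cases hdig : PySem.Str.strIsdigit (String.ofList [c]) = true
    · obtain ⟨v, hv⟩ := Option.isSome_iff_exists.mp (hc.1.trans hdig)
      simp only [hv, hdig, Bool.not_true, Bool.false_and]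
    · have hnone : PySem.Int.ofStr? (String.ofList [c]) = none := by
        rw [← Option.not_isSome_iff_eq_none, hc.1]
        simpa using hdig
      rw [hnone]
      simp only [hdig]
      have : ((c :: rest).all (fun ch =>
          decide (('1' ≤ ch ∧ ch ≤ '9') ∨ ('a' ≤ ch ∧ ch ≤ 'z') ∨ ('A' ≤ ch ∧ ch ≤ 'Z'))) = true)
          ↔ (PySem.Set.issubset (PySem.Set.ofList (c :: rest)) pvValidChars = true) := by
        rw [List.all_eq_true, PySem.Set.issubset_iff]
        constructor
        · intro h x hx
          have hx' := PySem.Set.mem_ofList (c :: rest) x |>.mp hx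
          exact (pvKeyChar x (hall x hx')).2.mpr (by simpa [pvCond] using h x hx')
        · intro h x hx
          have := (pvKeyChar x (hall x hx)).2.mp (h x ((PySem.Set.mem_ofList _ _).mpr hx))
          simpa [pvCond] using this
      have hEq : ((c :: rest).all (fun ch =>
          decide (('1' ≤ ch ∧ ch ≤ '9') ∨ ('a' ≤ ch ∧ ch ≤ 'z') ∨ ('A' ≤ ch ∧ ch ≤ 'Z'))))
          = PySem.Set.issubset (PySem.Set.ofList (c :: rest)) pvValidChars := by
        rcases Bool.eq_false_or_eq_true ((c :: rest).all (fun ch =>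
            decide (('1' ≤ ch ∧ ch ≤ '9') ∨ ('a' ≤ ch ∧ ch ≤ 'z') ∨ ('A' ≤ ch ∧ ch ≤ 'Z')))) with hA | hA
        · rw [hA, this.mp hA]
        · rcases Bool.eq_false_or_eq_true (PySem.Set.issubset (PySem.Set.ofList (c :: rest)) pvValidChars) with hB | hB
          · rw [this.mpr hB] at hA; cases hA
          · rw [hA, hB]
      simp only [Bool.not_false, Bool.true_and, hEq]
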